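-- pv_equiv track=rewrite | github.com/N3K0521/- | workshop03.py | addition_table
-- ===== SOURCE A (Python) =====
-- def addition_table(numbers):
--     table = []
--     for j in range(3):
--         row = []
--         for i in range(0, len(numbers)):
--             row.append(numbers[i] + j + 1)
--         table.append(row)
--     return table
-- ===== SOURCE B (Python) =====
-- def addition_table(numbers):
--     row1, row2, row3 = [], [], []
--     for n in numbers:
--         row1.append(n + 1)
--         row2.append(n + 2)
--         row3.append(n + 3)
--     return [row1, row2, row3]
-- ===== Notes on version B (the rewrite author's own statement) =====
-- stated objective: alternative
-- what changed: B builds all three rows in one pass over numbers instead of A's three separate scans (one per row).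
import Mathlib
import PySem

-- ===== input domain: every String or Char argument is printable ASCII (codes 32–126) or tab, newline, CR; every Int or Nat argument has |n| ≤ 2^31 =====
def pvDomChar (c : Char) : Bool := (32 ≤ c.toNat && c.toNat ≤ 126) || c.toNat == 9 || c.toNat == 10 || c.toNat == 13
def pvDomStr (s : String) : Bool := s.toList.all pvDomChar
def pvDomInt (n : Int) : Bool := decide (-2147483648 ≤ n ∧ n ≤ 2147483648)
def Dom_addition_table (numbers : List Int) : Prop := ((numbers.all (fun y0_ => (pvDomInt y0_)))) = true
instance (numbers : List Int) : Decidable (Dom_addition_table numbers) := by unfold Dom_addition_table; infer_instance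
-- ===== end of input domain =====

-- B builds all three rows in one pass over numbers instead of A's three separate scans (one per row).

-- ===== PORT A =====
-- for j in range(3): inner loop over indices builds row; table.append(row)
def addition_table (numbers : List Int) : List (List Int) :=
  (PySem.List.pyRange 0 3 1).foldl (fun table j =>
    let row := (PySem.List.pyRange 0 (numbers.length) 1).foldl (fun row i =>
      row ++ [(PySem.List.pyGet? numbers i).getD 0 + j + 1]) []
    table ++ [row]) []

-- ===== PORT B =====
-- one pass: the triple (row1, row2, row3) is extended simultaneously for each n
def addition_table_alt (numbers : List Int) : List (List Int) :=
  let rows := numbers.foldl (fun (rs : List Int × List Int × List Int) n =>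
    (rs.1 ++ [n + 1], rs.2.1 ++ [n + 2], rs.2.2 ++ [n + 3])) ([], [], [])
  [rows.1, rows.2.1, rows.2.2]

-- ===== PRECONDITION & SPEC =====
def Spec_addition_table (numbers : List Int) (out : List (List Int)) : Prop := out = addition_table_alt numbers
instance (numbers : List Int) (out : List (List Int)) : Decidable (Spec_addition_table numbers out) := by unfold Spec_addition_table; infer_instance

-- ===== CLAIM (what is proved, stated in full; the proofs are below) =====
def Claim_equal_addition_table : Prop := ∀ (numbers : List Int), Dom_addition_table numbers → Spec_addition_table numbers (addition_table numbers)

-- ===== LEMMAS AND PROOFS =====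

-- A's inner loop over indices builds the map (· + j + 1)
lemma a_row (numbers : List Int) (j : Int) :
    (PySem.List.pyRange 0 (numbers.length) 1).foldl (fun row i =>
      row ++ [(PySem.List.pyGet? numbers i).getD 0 + j + 1]) []
      = numbers.map (fun n => n + j + 1) := by
  induction numbers using List.reverseRecOn with
  | nil => norm_num [PySem.List.pyRange_one_eq_nil]
  | append_singleton xs x ih =>
    have hlen : ((xs ++ [x]).length : Int) = (xs.length : Int) + 1 := by
      simp
    rw [hlen, PySem.List.pyRange_one_succ_right (by positivity), List.foldl_append]
    simp only [List.foldl]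
    rw [PySem.List.foldl_congr_mem (g := fun row i =>
        row ++ [(PySem.List.pyGet? xs i).getD 0 + j + 1])]
    · rw [ih]
      simp
    · intro acc i hi
      have hi' := PySem.List.mem_pyRange_one.mp hi
      have : (PySem.List.pyGet? (xs ++ [x]) i) = PySem.List.pyGet? xs i := by
        obtain ⟨k, hk, rfl⟩ : ∃ k : Nat, k < xs.length ∧ (k : Int) = i := by
          refine ⟨i.toNat, ?_, ?_⟩ <;> omega
        rw [PySem.List.pyGet?_natCast, PySem.List.pyGet?_natCast]
        simp [List.getElem?_append_left hk]
      rw [this]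

-- B's single pass computes the three maps
lemma b_rows (numbers : List Int) :
    numbers.foldl (fun (rs : List Int × List Int × List Int) n =>
      (rs.1 ++ [n + 1], rs.2.1 ++ [n + 2], rs.2.2 ++ [n + 3])) ([], [], [])
    = (numbers.map (fun n => n + 1), numbers.map (fun n => n + 2),
       numbers.map (fun n => n + 3)) := by
  have gen : ∀ (r1 r2 r3 : List Int),
      numbers.foldl (fun (rs : List Int × List Int × List Int) n =>
        (rs.1 ++ [n + 1], rs.2.1 ++ [n + 2], rs.2.2 ++ [n + 3])) (r1, r2, r3)
      = (r1 ++ numbers.map (fun n => n + 1), r2 ++ numbers.map (fun n => n + 2),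
         r3 ++ numbers.map (fun n => n + 3)) := by
    induction numbers with
    | nil => simp
    | cons x xs ih => intro r1 r2 r3; simp [List.foldl, ih]
  simpa using gen [] [] []

-- ===== VERDICT (by name: the statement is the Claim_ definition above) =====
theorem addition_table_spec : Claim_equal_addition_table := by
  intro numbers _
  show addition_table numbers = addition_table_alt numbers
  unfold addition_table addition_table_alt
  rw [b_rows]
  have h3 : PySem.List.pyRange 0 3 1 = [0, 1, 2] := by decide
  rw [h3]
  simp only [List.foldl]
  rw [a_row, a_row, a_row]
  norm_num
  constructor <;> (intro a _; ring)
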